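-- pv_equiv track=rewrite | github.com/ganavi-20/test | flames.py | remove_common_letters
-- ===== SOURCE A (Python) =====
-- def remove_common_letters(name1, name2):
--     name1 = list(name1.lower().replace(" ", ""))
--     name2 = list(name2.lower().replace(" ", ""))
--
--     for letter in name1[:]:
--         if letter in name2:
--             name1.remove(letter)
--             name2.remove(letter)
--
--     return len(name1) + len(name2)
-- ===== SOURCE B (Python) =====
-- def remove_common_letters(name1, name2):
--     c1 = {}
--     for ch in name1.lower().replace(" ", ""):
--         c1[ch] = c1.get(ch, 0) + 1
--     c2 = {}
--     for ch in name2.lower().replace(" ", ""):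
--         c2[ch] = c2.get(ch, 0) + 1
--     total = 0
--     for ch in c1.keys() | c2.keys():
--         total += abs(c1.get(ch, 0) - c2.get(ch, 0))
--     return total
-- ===== Notes on version B (the rewrite author's own statement) =====
-- stated objective: faster
-- what changed: Replaces the quadratic remove-one-occurrence loop (repeated 'in' scans and list.remove) by building a character-count dictionary for each name once and summing abs(count1-count2) over the union of keys.
import Mathlib
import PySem

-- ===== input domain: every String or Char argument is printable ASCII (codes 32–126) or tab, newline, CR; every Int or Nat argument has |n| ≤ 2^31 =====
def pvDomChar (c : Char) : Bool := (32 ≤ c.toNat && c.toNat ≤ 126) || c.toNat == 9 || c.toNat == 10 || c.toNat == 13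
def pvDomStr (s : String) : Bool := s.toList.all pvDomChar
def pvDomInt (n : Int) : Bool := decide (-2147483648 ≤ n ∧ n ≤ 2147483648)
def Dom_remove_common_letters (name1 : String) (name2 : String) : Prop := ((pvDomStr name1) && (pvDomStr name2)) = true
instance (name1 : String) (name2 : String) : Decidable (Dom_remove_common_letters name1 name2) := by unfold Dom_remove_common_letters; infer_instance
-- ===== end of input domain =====

-- B replaces A's quadratic remove-one-occurrence loop by per-name character counters and
-- sums |count1-count2| over the union of keys (asymptotically faster; return value equal).


-- ===== PORT A =====
-- name1.remove(letter) is List.erase (first occurrence); the letter is always present there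
-- (each processed occurrence of a character erases at most one earlier occurrence of it),
-- so Python's ValueError branch is unreachable and the port is exact.
def remove_common_letters (name1 : String) (name2 : String) : Int :=
  let n1 := (PySem.Str.replace (PySem.Str.lower name1) " " "").toList
  let n2 := (PySem.Str.replace (PySem.Str.lower name2) " " "").toList
  let st := n1.foldl
    (fun (st : List Char × List Char) letter =>
      if letter ∈ st.2 then (st.1.erase letter, st.2.erase letter) else st)
    (n1, n2)
  (st.1.length : Int) + (st.2.length : Int)

-- ===== PORT B =====
def remove_common_letters_alt (name1 : String) (name2 : String) : Int :=
  let l1 := (PySem.Str.replace (PySem.Str.lower name1) " " "").toList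
  let l2 := (PySem.Str.replace (PySem.Str.lower name2) " " "").toList
  let c1 := l1.foldl (fun d ch => d.insert ch (d.getD ch 0 + 1)) (PySem.Dict.empty : PySem.Dict Char Int)
  let c2 := l2.foldl (fun d ch => d.insert ch (d.getD ch 0 + 1)) (PySem.Dict.empty : PySem.Dict Char Int)
  let keys := PySem.Set.union (PySem.Dict.keys c1) (PySem.Dict.keys c2)
  keys.foldl (fun total ch => total + |PySem.Dict.getD c1 ch 0 - PySem.Dict.getD c2 ch 0|) 0

-- ===== PRECONDITION & SPEC =====
def Spec_remove_common_letters (name1 : String) (name2 : String) (out : Int) : Prop := out = remove_common_letters_alt name1 name2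
instance (name1 : String) (name2 : String) (out : Int) : Decidable (Spec_remove_common_letters name1 name2 out) := by unfold Spec_remove_common_letters; infer_instance

-- ===== CLAIM (what is proved, stated in full; the proofs are below) =====
def Claim_equal_remove_common_letters : Prop := ∀ (name1 : String) (name2 : String), Dom_remove_common_letters name1 name2 → Spec_remove_common_letters name1 name2 (remove_common_letters name1 name2)

-- ===== LEMMAS AND PROOFS =====

-- number of matched (removed) pairs: mirrors A's loop on the second component
def pvM : List Char → List Char → Nat
  | [], _ => 0
  | c :: p, b => if c ∈ b then pvM p (b.erase c) + 1 else pvM p b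

lemma pv_loop_len : ∀ (p a b : List Char),
    (∀ c, p.count c ≤ a.count c) →
    ((p.foldl (fun (st : List Char × List Char) letter =>
        if letter ∈ st.2 then (st.1.erase letter, st.2.erase letter) else st) (a, b)).1.length
      + (p.foldl (fun (st : List Char × List Char) letter =>
        if letter ∈ st.2 then (st.1.erase letter, st.2.erase letter) else st) (a, b)).2.length)
      + 2 * pvM p b = a.length + b.length := by
  intro p
  induction p with
  | nil => intro a b _; simp [pvM]
  | cons c p ih =>
    intro a b h
    by_cases hc : c ∈ b
    · have hca : c ∈ a := by
        have := h c
        rw [List.count_cons_self] at this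
        exact List.count_pos_iff.mp (by omega)
      have h' : ∀ d, p.count d ≤ (a.erase c).count d := by
        intro d
        have := h d
        rw [List.count_cons] at this
        rw [List.count_erase]
        by_cases hdc : d = c <;> simp [hdc] at this ⊢ <;> omega
      have hthis := ih (a.erase c) (b.erase c) h'
      rw [List.length_erase_of_mem hca, List.length_erase_of_mem hc] at hthis
      have ha : 1 ≤ a.length := List.length_pos_of_mem hca
      have hb : 1 ≤ b.length := List.length_pos_of_mem hc
      simp only [List.foldl_cons, pvM, hc, if_true]
      omega
    · have h' : ∀ d, p.count d ≤ a.count d := by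
        intro d; have := h d; rw [List.count_cons] at this; omega
      have hthis := ih a b h'
      simp only [List.foldl_cons, pvM, hc, if_false]
      omega

lemma pv_M_eq_sum : ∀ (p b : List Char) (s : Finset Char),
    (∀ c ∈ p, c ∈ s) → (∀ c ∈ b, c ∈ s) →
    pvM p b = ∑ c ∈ s, min (p.count c) (b.count c) := by
  intro p
  induction p with
  | nil =>
    intro b s _ _
    simp [pvM]
  | cons c p ih =>
    intro b s hp hb
    have hcs : c ∈ s := hp c (List.mem_cons_self ..)
    by_cases hc : c ∈ b
    · have hrec := ih (b.erase c) s (fun d hd => hp d (List.mem_cons_of_mem _ hd))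
        (fun d hd => hb d (List.mem_of_mem_erase hd))
      have hbc : 1 ≤ b.count c := List.count_pos_iff.mpr hc
      rw [show pvM (c :: p) b = pvM p (b.erase c) + 1 by simp [pvM, hc], hrec]
      rw [← Finset.sum_erase_add s _ hcs, ← Finset.sum_erase_add s
        (fun d => min ((c :: p).count d) (b.count d)) hcs]
      have hpt : ∀ d ∈ s.erase c,
          min (p.count d) ((b.erase c).count d) = min ((c :: p).count d) (b.count d) := by
        intro d hd
        have hdc : d ≠ c := Finset.ne_of_mem_erase hd
        rw [List.count_erase, List.count_cons]
        simp [beq_iff_eq, Ne.symm hdc]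
      rw [Finset.sum_congr rfl hpt]
      rw [List.count_erase, List.count_cons_self]
      simp only [beq_self_eq_true, if_true]
      omega
    · have hrec := ih b s (fun d hd => hp d (List.mem_cons_of_mem _ hd)) hb
      have hbc : b.count c = 0 := List.count_eq_zero.mpr hc
      rw [show pvM (c :: p) b = pvM p b by simp [pvM, hc], hrec]
      refine Finset.sum_congr rfl fun d _ => ?_
      by_cases hdc : d = c
      · subst hdc; rw [hbc]; omega
      · rw [List.count_cons]; simp [beq_iff_eq, Ne.symm hdc]

lemma pv_len_eq_sum (l : List Char) (s : Finset Char) (h : ∀ c ∈ l, c ∈ s) :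
    ∑ c ∈ s, l.count c = l.length := by
  rw [← List.sum_toFinset_count_eq_length]
  symm
  refine Finset.sum_subset (fun x hx => h x (List.mem_toFinset.mp hx)) ?_
  intro x _ hx
  exact List.count_eq_zero.mpr (fun h' => hx (List.mem_toFinset.mpr h'))

lemma pv_abs_eq (a b : Nat) : |(a : Int) - b| = (a : Int) + b - 2 * (min a b : Nat) := by
  rcases Nat.le_total a b with h | h
  · have h' : (a : Int) ≤ b := by exact_mod_cast h
    rw [Nat.min_eq_left h, abs_of_nonpos (by omega)]
    omega
  · have h' : (b : Int) ≤ a := by exact_mod_cast h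
    rw [Nat.min_eq_right h, abs_of_nonneg (by omega)]
    omega

lemma pv_core (l1 l2 : List Char) :
    ((l1.foldl (fun (st : List Char × List Char) letter =>
        if letter ∈ st.2 then (st.1.erase letter, st.2.erase letter) else st) (l1, l2)).1.length
      + (l1.foldl (fun (st : List Char × List Char) letter =>
        if letter ∈ st.2 then (st.1.erase letter, st.2.erase letter) else st) (l1, l2)).2.length : Int)
    = ((PySem.Set.union (PySem.Set.ofList l1) (PySem.Set.ofList l2)).map
        (fun ch => |(l1.count ch : Int) - (l2.count ch : Int)|)).sum := by
  set u := PySem.Set.union (PySem.Set.ofList l1) (PySem.Set.ofList l2) with hu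
  have hnd : u.Nodup := PySem.Set.nodup_union _ (PySem.Set.ofList l2) (PySem.Set.nodup_ofList l1)
  have hmem : ∀ c : Char, c ∈ u ↔ c ∈ l1 ∨ c ∈ l2 := by
    intro c
    rw [hu, PySem.Set.mem_union, PySem.Set.mem_ofList, PySem.Set.mem_ofList]
  set s : Finset Char := u.toFinset with hs
  have hmems : ∀ c : Char, c ∈ s ↔ c ∈ l1 ∨ c ∈ l2 := by
    intro c; rw [hs, List.mem_toFinset, hmem]
  -- RHS as a Finset sum
  have hRHS : (u.map (fun ch => |(l1.count ch : Int) - (l2.count ch : Int)|)).sum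
      = ∑ c ∈ s, |(l1.count c : Int) - (l2.count c : Int)| := by
    rw [hs, List.sum_toFinset _ hnd]
  -- LHS via the loop lemma
  have hloop := pv_loop_len l1 l1 l2 (fun c => le_refl _)
  have hM := pv_M_eq_sum l1 l2 s (fun c hc => (hmems c).mpr (Or.inl hc))
    (fun c hc => (hmems c).mpr (Or.inr hc))
  have h1 := pv_len_eq_sum l1 s (fun c hc => (hmems c).mpr (Or.inl hc))
  have h2 := pv_len_eq_sum l2 s (fun c hc => (hmems c).mpr (Or.inr hc))
  rw [hRHS]
  have : ∑ c ∈ s, |(l1.count c : Int) - (l2.count c : Int)|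
      = ∑ c ∈ s, ((l1.count c : Int) + (l2.count c : Int) - 2 * ((min (l1.count c) (l2.count c) : Nat) : Int)) :=
    Finset.sum_congr rfl fun c _ => pv_abs_eq _ _
  rw [this, Finset.sum_sub_distrib, Finset.sum_add_distrib, ← Finset.mul_sum]
  have hc1 : ∑ c ∈ s, ((l1.count c : Int)) = ((l1.length : Nat) : Int) := by
    rw [← h1]; push_cast; ring
  have hc2 : ∑ c ∈ s, ((l2.count c : Int)) = ((l2.length : Nat) : Int) := by
    rw [← h2]; push_cast; ring
  have hcM : ∑ c ∈ s, ((min (l1.count c) (l2.count c) : Nat) : Int) = ((pvM l1 l2 : Nat) : Int) := by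
    rw [hM]; push_cast; ring
  rw [hc1, hc2, hcM]
  omega

-- ===== VERDICT (by name: the statement is the Claim_ definition above) =====
theorem remove_common_letters_spec : Claim_equal_remove_common_letters := by
  intro name1 name2 _
  unfold Spec_remove_common_letters
  simp only [remove_common_letters, remove_common_letters_alt]
  generalize (PySem.Str.replace (PySem.Str.lower name1) " " "").toList = l1
  generalize (PySem.Str.replace (PySem.Str.lower name2) " " "").toList = l2
  rw [PySem.Dict.foldl_insert_getD_add_one_eq_counter, PySem.Dict.foldl_insert_getD_add_one_eq_counter,
    PySem.Dict.keys_counter, PySem.Dict.keys_counter]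
  rw [PySem.List.foldl_add]
  simp only [PySem.Dict.getD_counter, zero_add]
  exact pv_core l1 l2
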